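-- pv_equiv track=rewrite | github.com/darakoo/pythonstudy | Section01/CodingTest.py | solution
-- ===== SOURCE A (Python) =====
-- def solution(absolutes, signs):
--     sum = 0
--     for idx in range(len(absolutes)):
--         if signs[idx] :
--             sum += absolutes[idx]
--         else:
--             sum += absolutes[idx] * (-1)
--
--     answer = sum
--     return answer
-- ===== SOURCE B (Python) =====
-- def solution(absolutes, signs):
--     total = 0
--     for x in absolutes:
--         total += x
--     neg = 0
--     for idx in range(len(absolutes)):
--         if not signs[idx]:
--             neg += absolutes[idx]
--     return total - 2 * neg
-- ===== Notes on version B (the rewrite author's own statement) =====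
-- stated objective: alternative
-- what changed: Instead of a single loop branching per element on its sign, B sums all absolutes in one pass, accumulates the negatively-flagged subtotal in a second pass, and returns total - 2*neg.
import Mathlib
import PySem

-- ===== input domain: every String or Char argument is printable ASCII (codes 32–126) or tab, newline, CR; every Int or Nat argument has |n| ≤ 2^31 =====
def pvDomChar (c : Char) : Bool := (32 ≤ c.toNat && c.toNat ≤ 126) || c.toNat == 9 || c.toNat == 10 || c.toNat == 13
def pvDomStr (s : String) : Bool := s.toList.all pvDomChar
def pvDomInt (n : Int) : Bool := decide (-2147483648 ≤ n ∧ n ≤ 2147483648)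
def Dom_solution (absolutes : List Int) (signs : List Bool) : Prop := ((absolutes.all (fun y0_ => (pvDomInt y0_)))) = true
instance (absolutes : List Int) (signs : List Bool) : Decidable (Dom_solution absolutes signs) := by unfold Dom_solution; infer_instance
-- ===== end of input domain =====

-- B sums all absolutes in one pass, then accumulates the negatively-flagged subtotal
-- in a second pass, returning total - 2*neg (alternative decomposition, same cost).

-- ===== PORT A =====
def solution (absolutes : List Int) (signs : List Bool) : Int :=
  (PySem.List.pyRange 0 absolutes.length 1).foldl
    (fun sum idx =>
      if PySem.List.pyGetD signs idx false then
        sum + PySem.List.pyGetD absolutes idx 0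
      else
        sum + PySem.List.pyGetD absolutes idx 0 * (-1)) 0

-- ===== PORT B =====
def solution_alt (absolutes : List Int) (signs : List Bool) : Int :=
  let total := absolutes.foldl (fun t x => t + x) 0
  let neg := (PySem.List.pyRange 0 absolutes.length 1).foldl
    (fun n idx =>
      if !(PySem.List.pyGetD signs idx false) then
        n + PySem.List.pyGetD absolutes idx 0
      else n) 0
  total - 2 * neg

-- ===== PRECONDITION & SPEC =====
-- Pre_ excludes exactly the inputs where Python A raises IndexError: signs shorter than absolutes.
def Pre_solution (absolutes : List Int) (signs : List Bool) : Prop :=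
  absolutes.length ≤ signs.length
instance (absolutes : List Int) (signs : List Bool) : Decidable (Pre_solution absolutes signs) := by
  unfold Pre_solution; infer_instance
def pvWitness_solution : List Int × List Bool := ([4, 7, 12], [true, false, true])

def Spec_solution (absolutes : List Int) (signs : List Bool) (out : Int) : Prop := out = solution_alt absolutes signs
instance (absolutes : List Int) (signs : List Bool) (out : Int) : Decidable (Spec_solution absolutes signs out) := by unfold Spec_solution; infer_instance

-- ===== CLAIM (what is proved, stated in full; the proofs are below) =====
def Claim_equal_solution : Prop := ∀ (absolutes : List Int) (signs : List Bool), Dom_solution absolutes signs → Pre_solution absolutes signs → Spec_solution absolutes signs (solution absolutes signs)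

-- ===== LEMMAS AND PROOFS =====

-- A's loop as init + sum over the index list
theorem foldA_eq (g : Int → Bool) (h : Int → Int) :
    ∀ (L : List Int) (c : Int),
      L.foldl (fun sum idx => if g idx then sum + h idx else sum + h idx * (-1)) c
        = c + (L.map (fun i => if g i then h i else -(h i))).sum := by
  intro L
  induction L with
  | nil => intro c; simp
  | cons x t ih =>
    intro c
    simp only [List.foldl_cons, List.map_cons, List.sum_cons, ih]
    split <;> ring

-- B's neg loop as init + sum over the index list
theorem foldN_eq (g : Int → Bool) (h : Int → Int) :
    ∀ (L : List Int) (c : Int),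
      L.foldl (fun n idx => if !(g idx) then n + h idx else n) c
        = c + (L.map (fun i => if g i then 0 else h i)).sum := by
  intro L
  induction L with
  | nil => intro c; simp
  | cons x t ih =>
    intro c
    simp only [List.foldl_cons, List.map_cons, List.sum_cons, ih]
    cases hg : g x <;> simp <;> ring

-- pointwise: (if g then h else -h) = h - 2 * (if g then 0 else h), summed
theorem sum_relation (g : Int → Bool) (h : Int → Int) :
    ∀ (L : List Int),
      (L.map (fun i => if g i then h i else -(h i))).sum
        = (L.map h).sum - 2 * (L.map (fun i => if g i then 0 else h i)).sum := by
  intro L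
  induction L with
  | nil => simp
  | cons x t ih =>
    simp only [List.map_cons, List.sum_cons, ih]
    cases hg : g x <;> simp <;> ring

-- ===== VERDICT (by name: the statement is the Claim_ definition above) =====
theorem solution_spec : Claim_equal_solution := by
  intro absolutes signs _ _
  unfold Spec_solution solution solution_alt
  rw [foldA_eq (fun idx => PySem.List.pyGetD signs idx false)
      (fun idx => PySem.List.pyGetD absolutes idx 0),
    foldN_eq (fun idx => PySem.List.pyGetD signs idx false)
      (fun idx => PySem.List.pyGetD absolutes idx 0),
    sum_relation]
  have htot : ((PySem.List.pyRange 0 absolutes.length 1).map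
      (fun idx => PySem.List.pyGetD absolutes idx 0)).sum
      = absolutes.foldl (fun t x => t + x) 0 := by
    rw [PySem.List.map_pyGetD_pyRange_zero']
    have : ∀ (l : List Int) (c : Int), l.foldl (fun t x => t + x) c = c + l.sum := by
      intro l; induction l with
      | nil => intro c; simp
      | cons y t ih => intro c; simp [ih]; ring
    rw [this]; simp
  simp only [zero_add, htot]
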